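-- pv_equiv track=rewrite | github.com/boluwatifedaniel705-star/hng-stage-2-task | app/services/nlp_parser.py | _resolve_country
-- ===== SOURCE A (Python) =====
-- from typing import Optional
--
-- COUNTRY_NAME_TO_ID = {
--     "nigeria": "NG", "ghana": "GH", "kenya": "KE", "angola": "AO",
--     "benin": "BJ", "south africa": "ZA", "ethiopia": "ET", "tanzania": "TZ",
--     "uganda": "UG", "senegal": "SN", "cameroon": "CM", "ivory coast": "CI",
--     "cote d'ivoire": "CI", "côte d'ivoire": "CI", "zimbabwe": "ZW",
--     "zambia": "ZM", "mozambique": "MZ", "madagascar": "MG", "mali": "ML",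
--     "niger": "NE", "burkina faso": "BF", "guinea": "GN", "rwanda": "RW",
--     "somalia": "SO", "chad": "TD", "south sudan": "SS", "togo": "TG",
--     "sierra leone": "SL", "liberia": "LR", "central african republic": "CF",
--     "mauritania": "MR", "eritrea": "ER", "gambia": "GM", "botswana": "BW",
--     "namibia": "NA", "gabon": "GA", "lesotho": "LS", "guinea-bissau": "GW",
--     "equatorial guinea": "GQ", "mauritius": "MU", "djibouti": "DJ",
--     "comoros": "KM", "cape verde": "CV", "seychelles": "SC", "egypt": "EG",
--     "morocco": "MA", "algeria": "DZ", "tunisia": "TN", "libya": "LY",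
--     "sudan": "SD", "congo": "CG", "democratic republic of congo": "CD",
--     "dr congo": "CD", "drc": "CD", "malawi": "MW", "burundi": "BI",
--     "sao tome and principe": "ST", "eswatini": "SZ", "swaziland": "SZ",
--     "cabo verde": "CV",
--     "usa": "US", "united states": "US", "america": "US",
--     "uk": "GB", "united kingdom": "GB", "britain": "GB", "england": "GB",
--     "france": "FR", "germany": "DE", "italy": "IT", "spain": "ES",
--     "portugal": "PT", "brazil": "BR", "india": "IN", "china": "CN",
--     "japan": "JP", "canada": "CA", "australia": "AU", "mexico": "MX",
--     "argentina": "AR", "colombia": "CO", "pakistan": "PK",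
--     "indonesia": "ID", "russia": "RU", "turkey": "TR",
-- }
--
-- def _resolve_country(text: str) -> Optional[str]:
--     text = text.strip().lower()
--     for country_name, code in sorted(
--         COUNTRY_NAME_TO_ID.items(), key=lambda x: -len(x[0])
--     ):
--         if text == country_name or text.startswith(country_name):
--             return code
--     return None
-- ===== SOURCE B (Python) =====
-- from typing import Optional
--
-- COUNTRY_NAME_TO_ID = {
--     "nigeria": "NG", "ghana": "GH", "kenya": "KE", "angola": "AO",
--     "benin": "BJ", "south africa": "ZA", "ethiopia": "ET", "tanzania": "TZ",
--     "uganda": "UG", "senegal": "SN", "cameroon": "CM", "ivory coast": "CI",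
--     "cote d'ivoire": "CI", "côte d'ivoire": "CI", "zimbabwe": "ZW",
--     "zambia": "ZM", "mozambique": "MZ", "madagascar": "MG", "mali": "ML",
--     "niger": "NE", "burkina faso": "BF", "guinea": "GN", "rwanda": "RW",
--     "somalia": "SO", "chad": "TD", "south sudan": "SS", "togo": "TG",
--     "sierra leone": "SL", "liberia": "LR", "central african republic": "CF",
--     "mauritania": "MR", "eritrea": "ER", "gambia": "GM", "botswana": "BW",
--     "namibia": "NA", "gabon": "GA", "lesotho": "LS", "guinea-bissau": "GW",
--     "equatorial guinea": "GQ", "mauritius": "MU", "djibouti": "DJ",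
--     "comoros": "KM", "cape verde": "CV", "seychelles": "SC", "egypt": "EG",
--     "morocco": "MA", "algeria": "DZ", "tunisia": "TN", "libya": "LY",
--     "sudan": "SD", "congo": "CG", "democratic republic of congo": "CD",
--     "dr congo": "CD", "drc": "CD", "malawi": "MW", "burundi": "BI",
--     "sao tome and principe": "ST", "eswatini": "SZ", "swaziland": "SZ",
--     "cabo verde": "CV",
--     "usa": "US", "united states": "US", "america": "US",
--     "uk": "GB", "united kingdom": "GB", "britain": "GB", "england": "GB",
--     "france": "FR", "germany": "DE", "italy": "IT", "spain": "ES",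
--     "portugal": "PT", "brazil": "BR", "india": "IN", "china": "CN",
--     "japan": "JP", "canada": "CA", "australia": "AU", "mexico": "MX",
--     "argentina": "AR", "colombia": "CO", "pakistan": "PK",
--     "indonesia": "ID", "russia": "RU", "turkey": "TR",
-- }
--
-- def _resolve_country(text: str) -> Optional[str]:
--     # Hash lookup keyed on descending-length prefixes of the normalized text:
--     # the longest dictionary name that is a prefix of the text wins, exactly as
--     # in the sorted scan (same-length prefixes of one text are identical, so no ties).
--     text = text.strip().lower()
--     for length in range(len(text), 0, -1):
--         code = COUNTRY_NAME_TO_ID.get(text[:length])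
--         if code is not None:
--             return code
--     return None
-- ===== Notes on version B (the rewrite author's own statement) =====
-- stated objective: alternative
-- what changed: Instead of sorting the 85 dictionary entries by descending name length and scanning them with a prefix test per entry, B takes each descending-length prefix of the stripped/lowercased text and resolves it with a single dict hash lookup, so the loop ranges over the text's length rather than over the dictionary.
import Mathlib
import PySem

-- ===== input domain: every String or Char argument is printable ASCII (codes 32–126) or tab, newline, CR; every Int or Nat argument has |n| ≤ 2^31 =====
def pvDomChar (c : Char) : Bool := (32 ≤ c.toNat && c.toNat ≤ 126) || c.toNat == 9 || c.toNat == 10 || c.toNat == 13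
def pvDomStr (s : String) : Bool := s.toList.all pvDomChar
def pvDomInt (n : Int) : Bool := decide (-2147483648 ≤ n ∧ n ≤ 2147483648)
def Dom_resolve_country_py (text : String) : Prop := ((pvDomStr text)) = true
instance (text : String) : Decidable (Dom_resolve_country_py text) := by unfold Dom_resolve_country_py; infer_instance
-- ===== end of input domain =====

-- B replaces A's scan of the dictionary sorted by descending name length with a
-- per-prefix hash lookup: one dict lookup for each descending-length prefix of the
-- normalized text (alternative decomposition, same result).

-- ===== PORT A =====
-- COUNTRY_NAME_TO_ID as an association list in insertion order (all keys distinct)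
def pvCountryItems : List (String × String) := [("nigeria", "NG"),
  ("ghana", "GH"),
  ("kenya", "KE"),
  ("angola", "AO"),
  ("benin", "BJ"),
  ("south africa", "ZA"),
  ("ethiopia", "ET"),
  ("tanzania", "TZ"),
  ("uganda", "UG"),
  ("senegal", "SN"),
  ("cameroon", "CM"),
  ("ivory coast", "CI"),
  ("cote d'ivoire", "CI"),
  ("côte d'ivoire", "CI"),
  ("zimbabwe", "ZW"),
  ("zambia", "ZM"),
  ("mozambique", "MZ"),
  ("madagascar", "MG"),
  ("mali", "ML"),
  ("niger", "NE"),
  ("burkina faso", "BF"),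
  ("guinea", "GN"),
  ("rwanda", "RW"),
  ("somalia", "SO"),
  ("chad", "TD"),
  ("south sudan", "SS"),
  ("togo", "TG"),
  ("sierra leone", "SL"),
  ("liberia", "LR"),
  ("central african republic", "CF"),
  ("mauritania", "MR"),
  ("eritrea", "ER"),
  ("gambia", "GM"),
  ("botswana", "BW"),
  ("namibia", "NA"),
  ("gabon", "GA"),
  ("lesotho", "LS"),
  ("guinea-bissau", "GW"),
  ("equatorial guinea", "GQ"),
  ("mauritius", "MU"),
  ("djibouti", "DJ"),
  ("comoros", "KM"),
  ("cape verde", "CV"),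
  ("seychelles", "SC"),
  ("egypt", "EG"),
  ("morocco", "MA"),
  ("algeria", "DZ"),
  ("tunisia", "TN"),
  ("libya", "LY"),
  ("sudan", "SD"),
  ("congo", "CG"),
  ("democratic republic of congo", "CD"),
  ("dr congo", "CD"),
  ("drc", "CD"),
  ("malawi", "MW"),
  ("burundi", "BI"),
  ("sao tome and principe", "ST"),
  ("eswatini", "SZ"),
  ("swaziland", "SZ"),
  ("cabo verde", "CV"),
  ("usa", "US"),
  ("united states", "US"),
  ("america", "US"),
  ("uk", "GB"),
  ("united kingdom", "GB"),
  ("britain", "GB"),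
  ("england", "GB"),
  ("france", "FR"),
  ("germany", "DE"),
  ("italy", "IT"),
  ("spain", "ES"),
  ("portugal", "PT"),
  ("brazil", "BR"),
  ("india", "IN"),
  ("china", "CN"),
  ("japan", "JP"),
  ("canada", "CA"),
  ("australia", "AU"),
  ("mexico", "MX"),
  ("argentina", "AR"),
  ("colombia", "CO"),
  ("pakistan", "PK"),
  ("indonesia", "ID"),
  ("russia", "RU"),
  ("turkey", "TR")]

-- the 'for country_name, code in sorted(...)' loop with its early return
def pvALoop : List (String × String) → String → Option String
  | [], _ => none
  | (name, code) :: rest, t =>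
    if t == name || PySem.Str.startswith t name then some code else pvALoop rest t

def resolve_country_py (text : String) : Option String :=
  let t := PySem.Str.lower (PySem.Str.strip text)
  pvALoop (PySem.List.sorted pvCountryItems (fun x => -(PySem.Str.len x.1)) false) t

-- ===== PORT B =====
-- COUNTRY_NAME_TO_ID.get(prefix): Python dict.get with these 85 distinct literal
-- keys is exact-key lookup, written here as a decision chain over the keys (exact).
def pvCountryCode? (k : String) : Option String :=
  if "nigeria" == k then some "NG" else
  if "ghana" == k then some "GH" else
  if "kenya" == k then some "KE" else
  if "angola" == k then some "AO" else
  if "benin" == k then some "BJ" else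
  if "south africa" == k then some "ZA" else
  if "ethiopia" == k then some "ET" else
  if "tanzania" == k then some "TZ" else
  if "uganda" == k then some "UG" else
  if "senegal" == k then some "SN" else
  if "cameroon" == k then some "CM" else
  if "ivory coast" == k then some "CI" else
  if "cote d'ivoire" == k then some "CI" else
  if "côte d'ivoire" == k then some "CI" else
  if "zimbabwe" == k then some "ZW" else
  if "zambia" == k then some "ZM" else
  if "mozambique" == k then some "MZ" else
  if "madagascar" == k then some "MG" else
  if "mali" == k then some "ML" else
  if "niger" == k then some "NE" else
  if "burkina faso" == k then some "BF" else
  if "guinea" == k then some "GN" else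
  if "rwanda" == k then some "RW" else
  if "somalia" == k then some "SO" else
  if "chad" == k then some "TD" else
  if "south sudan" == k then some "SS" else
  if "togo" == k then some "TG" else
  if "sierra leone" == k then some "SL" else
  if "liberia" == k then some "LR" else
  if "central african republic" == k then some "CF" else
  if "mauritania" == k then some "MR" else
  if "eritrea" == k then some "ER" else
  if "gambia" == k then some "GM" else
  if "botswana" == k then some "BW" else
  if "namibia" == k then some "NA" else
  if "gabon" == k then some "GA" else
  if "lesotho" == k then some "LS" else
  if "guinea-bissau" == k then some "GW" else
  if "equatorial guinea" == k then some "GQ" else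
  if "mauritius" == k then some "MU" else
  if "djibouti" == k then some "DJ" else
  if "comoros" == k then some "KM" else
  if "cape verde" == k then some "CV" else
  if "seychelles" == k then some "SC" else
  if "egypt" == k then some "EG" else
  if "morocco" == k then some "MA" else
  if "algeria" == k then some "DZ" else
  if "tunisia" == k then some "TN" else
  if "libya" == k then some "LY" else
  if "sudan" == k then some "SD" else
  if "congo" == k then some "CG" else
  if "democratic republic of congo" == k then some "CD" else
  if "dr congo" == k then some "CD" else
  if "drc" == k then some "CD" else
  if "malawi" == k then some "MW" else
  if "burundi" == k then some "BI" else
  if "sao tome and principe" == k then some "ST" else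
  if "eswatini" == k then some "SZ" else
  if "swaziland" == k then some "SZ" else
  if "cabo verde" == k then some "CV" else
  if "usa" == k then some "US" else
  if "united states" == k then some "US" else
  if "america" == k then some "US" else
  if "uk" == k then some "GB" else
  if "united kingdom" == k then some "GB" else
  if "britain" == k then some "GB" else
  if "england" == k then some "GB" else
  if "france" == k then some "FR" else
  if "germany" == k then some "DE" else
  if "italy" == k then some "IT" else
  if "spain" == k then some "ES" else
  if "portugal" == k then some "PT" else
  if "brazil" == k then some "BR" else
  if "india" == k then some "IN" else
  if "china" == k then some "CN" else
  if "japan" == k then some "JP" else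
  if "canada" == k then some "CA" else
  if "australia" == k then some "AU" else
  if "mexico" == k then some "MX" else
  if "argentina" == k then some "AR" else
  if "colombia" == k then some "CO" else
  if "pakistan" == k then some "PK" else
  if "indonesia" == k then some "ID" else
  if "russia" == k then some "RU" else
  if "turkey" == k then some "TR" else
  none

-- the 'for length in range(len(text), 0, -1)' loop with its early return
def pvPrefixLoop (t : String) : List Int → Option String
  | [] => none
  | L :: rest =>
    match pvCountryCode? (PySem.Str.slice t none (some L)) with
    | some code => some code
    | none => pvPrefixLoop t rest

def resolve_country_py_alt (text : String) : Option String :=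
  let t := PySem.Str.lower (PySem.Str.strip text)
  pvPrefixLoop t (PySem.List.pyRange (PySem.Str.len t) 0 (-1))

-- ===== PRECONDITION & SPEC =====
def Spec_resolve_country_py (text : String) (out : Option String) : Prop := out = resolve_country_py_alt text
instance (text : String) (out : Option String) : Decidable (Spec_resolve_country_py text out) := by unfold Spec_resolve_country_py; infer_instance

-- ===== CLAIM (what is proved, stated in full; the proofs are below) =====
def Claim_equal_resolve_country_py : Prop := ∀ (text : String), Dom_resolve_country_py text → Spec_resolve_country_py text (resolve_country_py text)

-- ===== LEMMAS AND PROOFS =====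

-- A's loop condition is exactly "name is a prefix of t"
theorem pvCond_iff (t name : String) :
    (t == name || PySem.Str.startswith t name) = true ↔ name.toList <+: t.toList := by
  simp only [Bool.or_eq_true, beq_iff_eq, PySem.Str.startswith_eq, PySem.Chars.startswith_iff]
  constructor
  · rintro (rfl | h)
    · exact List.prefix_refl _
    · exact h
  · intro h
    exact Or.inr h

theorem pvALoop_append (l₁ l₂ : List (String × String)) (t : String) :
    pvALoop (l₁ ++ l₂) t =
      (match pvALoop l₁ t with | some c => some c | none => pvALoop l₂ t) := by
  induction l₁ with
  | nil => rfl
  | cons e r ih =>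
    obtain ⟨name, code⟩ := e
    simp only [List.cons_append, pvALoop]
    split_ifs with h <;> simp [ih]

-- dropping entries that can never match does not change the scan
theorem pvALoop_filter (l : List (String × String)) (t : String)
    (p : String × String → Bool)
    (h : ∀ e ∈ l, p e = false → ¬ e.1.toList <+: t.toList) :
    pvALoop l t = pvALoop (l.filter p) t := by
  induction l with
  | nil => rfl
  | cons e r ih =>
    obtain ⟨name, code⟩ := e
    by_cases hp : p (name, code) = true
    · simp only [List.filter_cons_of_pos hp, pvALoop]
      split_ifs with hc
      · rfl
      · exact ih (fun x hx => h x (List.mem_cons_of_mem _ hx))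
    · have hfalse : p (name, code) = false := by simpa using hp
      have hnm : ¬ (name, code).1.toList <+: t.toList := h _ (List.mem_cons_self) hfalse
      rw [List.filter_cons_of_neg (by simp [hfalse])]
      simp only [pvALoop]
      rw [if_neg (fun hc => hnm ((pvCond_iff t name).mp hc))]
      exact ih (fun x hx => h x (List.mem_cons_of_mem _ hx))

-- a list with weakly decreasing key length splits its "≤ L+1" filter into the "= L+1" block then "≤ L"
theorem pvFilter_split (l : List (String × String)) (L : Nat)
    (hp : l.Pairwise (fun a b => b.1.toList.length ≤ a.1.toList.length)) :
    l.filter (fun e => decide (e.1.toList.length ≤ L + 1)) =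
      l.filter (fun e => decide (e.1.toList.length = L + 1)) ++
        l.filter (fun e => decide (e.1.toList.length ≤ L)) := by
  induction l with
  | nil => rfl
  | cons e r ih =>
    obtain ⟨hhead, hr⟩ := List.pairwise_cons.mp hp
    have ih' := ih hr
    by_cases hle : e.1.toList.length ≤ L + 1
    · by_cases he : e.1.toList.length = L + 1
      · rw [List.filter_cons_of_pos (by simpa using hle),
            List.filter_cons_of_pos (by simpa using he),
            List.filter_cons_of_neg (by simp only [decide_eq_true_eq]; omega), ih']
        simp
      · have heL : e.1.toList.length ≤ L := by omega
        have hempty : r.filter (fun x => decide (x.1.toList.length = L + 1)) = [] := by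
          refine List.filter_eq_nil_iff.mpr (fun x hx => ?_)
          have := hhead x hx
          simp only [decide_eq_true_eq]
          omega
        rw [List.filter_cons_of_pos (by simpa using hle),
            List.filter_cons_of_neg (by simpa using he),
            List.filter_cons_of_pos (by simpa using heL), ih', hempty]
        simp
    · rw [List.filter_cons_of_neg (by simpa using hle),
          List.filter_cons_of_neg (by simp only [decide_eq_true_eq]; omega),
          List.filter_cons_of_neg (by simp only [decide_eq_true_eq]; omega), ih']

-- first-key lookup on a cons cell (find?_cons_of_pos/neg with the key predicate fixed)
theorem pvFindKey_cons_pos {e : String × String} {l : List (String × String)} {k : String}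
    (h : (e.1 == k) = true) :
    List.find? (fun x => x.1 == k) (e :: l) = some e :=
  List.find?_cons_of_pos (p := fun x : String × String => x.1 == k) h

theorem pvFindKey_cons_neg {e : String × String} {l : List (String × String)} {k : String}
    (h : ¬ (e.1 == k) = true) :
    List.find? (fun x => x.1 == k) (e :: l) = List.find? (fun x => x.1 == k) l :=
  List.find?_cons_of_neg (p := fun x : String × String => x.1 == k) (by simpa using h)

-- cons step of a first-key lookup projected to the value (used to unfold the bridge)
theorem pvFindMap_cons (e : String × String) (l : List (String × String)) (k : String) :
    Option.map Prod.snd (List.find? (fun x => x.1 == k) (e :: l)) =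
      if e.1 == k then some e.2 else Option.map Prod.snd (List.find? (fun x => x.1 == k) l) := by
  by_cases h : (e.1 == k) = true
  · rw [pvFindKey_cons_pos h, if_pos h]
    rfl
  · rw [pvFindKey_cons_neg h, if_neg h]

set_option maxHeartbeats 1000000 in
set_option maxRecDepth 40000 in
-- B's decision chain IS first-key lookup in the insertion-order association list
theorem pvBridge (k : String) :
    pvCountryCode? k = Option.map Prod.snd (pvCountryItems.find? (fun e => e.1 == k)) := by
  simp only [pvCountryCode?, pvCountryItems, pvFindMap_cons, List.find?_nil, Option.map_none]

-- scanning a block of entries whose keys all have length m is a first-key lookup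
theorem pvALoop_block (l : List (String × String)) (t : String) (m : Nat)
    (hall : ∀ e ∈ l, e.1.toList.length = m) :
    pvALoop l t =
      Option.map Prod.snd (l.find? (fun p => p.1 == String.ofList (t.toList.take m))) := by
  induction l with
  | nil => rfl
  | cons e r ih =>
    obtain ⟨name, code⟩ := e
    have hlen : name.toList.length = m := hall _ (List.mem_cons_self)
    have hiff : (name.toList <+: t.toList) ↔ name.toList = t.toList.take m := by
      rw [List.prefix_iff_eq_take, hlen]
    by_cases hpre : name.toList = t.toList.take m
    · have hkey : ((name, code).1 == String.ofList (t.toList.take m)) = true := by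
        simp only [beq_iff_eq]
        apply String.toList_inj.mp
        simpa using hpre
      rw [pvFindKey_cons_pos hkey]
      simp only [pvALoop]
      rw [if_pos ((pvCond_iff t name).mpr (hiff.mpr hpre))]
      rfl
    · have hkey : ¬ ((name, code).1 == String.ofList (t.toList.take m)) = true := by
        simp only [beq_iff_eq]
        intro h
        exact hpre (by simpa using congrArg String.toList h)
      rw [pvFindKey_cons_neg hkey]
      simp only [pvALoop]
      rw [if_neg (fun hc => hpre (hiff.mp ((pvCond_iff t name).mp hc)))]
      exact ih (fun x hx => hall x (List.mem_cons_of_mem _ hx))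

-- a first-key lookup ignores entries whose key cannot equal the searched key
theorem pvFind_filter (l : List (String × String)) (k : String)
    (p : String × String → Bool) (hk : ∀ e : String × String, e.1 = k → p e = true) :
    (l.filter p).find? (fun e => e.1 == k) = l.find? (fun e => e.1 == k) := by
  induction l with
  | nil => rfl
  | cons e r ih =>
    by_cases hp : p e = true
    · rw [List.filter_cons_of_pos hp]
      by_cases hek : (e.1 == k) = true
      · rw [pvFindKey_cons_pos hek, pvFindKey_cons_pos hek]
      · rw [pvFindKey_cons_neg hek, pvFindKey_cons_neg hek]
        exact ih
    · have hek : ¬ (e.1 == k) = true := by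
        intro h
        exact hp (hk e (by simpa using h))
      rw [List.filter_cons_of_neg (by simpa using hp), pvFindKey_cons_neg hek]
      exact ih

-- with distinct keys, first-key lookup is invariant under permutation
theorem pvFind_perm (l₁ l₂ : List (String × String)) (hperm : l₁.Perm l₂)
    (hnodup : (l₂.map Prod.fst).Nodup) (k : String) :
    l₁.find? (fun e => e.1 == k) = l₂.find? (fun e => e.1 == k) := by
  induction hperm with
  | nil => rfl
  | cons x h ih =>
    rw [List.map_cons] at hnodup
    by_cases hx : (x.1 == k) = true
    · rw [pvFindKey_cons_pos hx, pvFindKey_cons_pos hx]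
    · rw [pvFindKey_cons_neg hx, pvFindKey_cons_neg hx]
      exact ih (List.nodup_cons.mp hnodup).2
  | swap x y l =>
    rw [List.map_cons, List.map_cons] at hnodup
    have hxy : x.1 ≠ y.1 := by
      intro h
      exact (List.nodup_cons.mp hnodup).1 (h ▸ List.mem_cons_self)
    by_cases hx : (x.1 == k) = true
    · have hy : ¬ (y.1 == k) = true := by
        intro hy
        exact hxy ((beq_iff_eq.mp hx).trans (beq_iff_eq.mp hy).symm)
      rw [pvFindKey_cons_neg hy, pvFindKey_cons_pos hx, pvFindKey_cons_pos hx]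
    · by_cases hy : (y.1 == k) = true
      · rw [pvFindKey_cons_pos hy, pvFindKey_cons_neg hx, pvFindKey_cons_pos hy]
      · rw [pvFindKey_cons_neg hy, pvFindKey_cons_neg hx,
            pvFindKey_cons_neg hx, pvFindKey_cons_neg hy]
  | trans h₁ h₂ ih₁ ih₂ =>
    have hmid := ((h₂.map Prod.fst).nodup_iff).mpr hnodup
    exact (ih₁ hmid).trans (ih₂ hnodup)

set_option maxRecDepth 40000 in
theorem pvNodupKeys : (pvCountryItems.map Prod.fst).Nodup := by decide

set_option maxRecDepth 40000 in
theorem pvKeysNonempty : ∀ e ∈ pvCountryItems, 0 < e.1.toList.length := by decide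

set_option maxRecDepth 40000 in
-- main induction: B's loop down to prefix length L equals A's scan over names of length ≤ L
theorem pvMain (t : String) (L : Nat) (hL : L ≤ t.toList.length) :
    pvPrefixLoop t (PySem.List.pyRange (L : Int) 0 (-1)) =
      pvALoop ((PySem.List.sorted pvCountryItems (fun x => -(PySem.Str.len x.1)) false).filter
        (fun e => decide (e.1.toList.length ≤ L))) t := by
  induction L with
  | zero =>
    have h00 : ((0 : Nat) : Int) ≤ 0 := by simp
    rw [PySem.List.pyRange_neg_one_eq_nil h00]
    have hnil : (PySem.List.sorted pvCountryItems (fun x => -(PySem.Str.len x.1)) false).filter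
        (fun e => decide (e.1.toList.length ≤ 0)) = [] := by
      refine List.filter_eq_nil_iff.mpr (fun e he => ?_)
      have hmem : e ∈ pvCountryItems := (PySem.List.mem_sorted _ _ _ _).mp he
      have := pvKeysNonempty e hmem
      simp only [decide_eq_true_eq]
      omega
    rw [hnil]
    rfl
  | succ L ih =>
    have hcast : ((L + 1 : Nat) : Int) - 1 = (L : Int) := by push_cast; ring
    have hpos : (0 : Int) < ((L + 1 : Nat) : Int) := by omega
    rw [PySem.List.pyRange_neg_one_cons hpos, hcast]
    have hunfold : pvPrefixLoop t (((L + 1 : Nat) : Int) :: PySem.List.pyRange (L : Int) 0 (-1)) =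
        (match pvCountryCode? (PySem.Str.slice t none (some ((L + 1 : Nat) : Int))) with
         | some code => some code
         | none => pvPrefixLoop t (PySem.List.pyRange (L : Int) 0 (-1))) := rfl
    -- the sliced prefix is the length-(L+1) take of the text
    have hslice : PySem.Str.slice t none (some ((L + 1 : Nat) : Int)) =
        String.ofList (t.toList.take (L + 1)) := by
      apply String.toList_inj.mp
      have hnn : (0 : Int) ≤ ((L + 1 : Nat) : Int) := by omega
      rw [PySem.Str.toList_slice, PySem.Chars.slice_eq_listSlice,
          PySem.List.slice_to _ hnn]
      simp
    -- the sorted list has weakly decreasing key lengths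
    have hpair : (PySem.List.sorted pvCountryItems (fun x => -(PySem.Str.len x.1)) false).Pairwise
        (fun a b => b.1.toList.length ≤ a.1.toList.length) := by
      have := PySem.List.sorted_pairwise pvCountryItems (fun x => -(PySem.Str.len x.1))
      refine this.imp (fun h => ?_)
      simp only [PySem.Str.len_eq] at h
      omega
    -- B's per-prefix lookup equals A's scan of the length-(L+1) block of the sorted list
    have hget : pvCountryCode? (PySem.Str.slice t none (some ((L + 1 : Nat) : Int))) =
        pvALoop (((PySem.List.sorted pvCountryItems (fun x => -(PySem.Str.len x.1)) false)).filter
          (fun e => decide (e.1.toList.length = L + 1))) t := by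
      rw [hslice]
      rw [pvALoop_block _ t (L + 1)
        (fun e he => by simpa using (List.mem_filter.mp he).2)]
      rw [pvFind_filter _ _ _ (fun e heq => by
        simp only [decide_eq_true_eq]
        rw [heq]
        simp only [String.toList_ofList]
        rw [List.length_take]
        omega)]
      rw [pvFind_perm _ _ (PySem.List.sorted_perm pvCountryItems _ false) pvNodupKeys _]
      exact pvBridge _
    rw [hunfold, hget, pvFilter_split _ L hpair, pvALoop_append]
    rcases hA : pvALoop ((PySem.List.sorted pvCountryItems (fun x => -(PySem.Str.len x.1)) false).filter
        (fun e => decide (e.1.toList.length = L + 1))) t with _ | c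
    · exact ih (by omega)
    · rfl

-- ===== VERDICT (by name: the statement is the Claim_ definition above) =====
theorem resolve_country_py_spec : Claim_equal_resolve_country_py := by
  unfold Claim_equal_resolve_country_py
  intro text _
  unfold Spec_resolve_country_py resolve_country_py resolve_country_py_alt
  simp only [PySem.Str.len_eq]
  rw [pvMain _ _ (le_refl _)]
  exact pvALoop_filter _ _ _ (fun e he hf hpre => by
    have := hpre.length_le
    simp only [decide_eq_false_iff_not, not_le] at hf
    omega)
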